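-- pv_equiv track=rewrite | github.com/clavrr/clavr | src/agent/parsers/email/feedback_handlers.py | is_intent_mismatch
-- ===== SOURCE A (Python) =====
-- def is_intent_mismatch(original: str, correction: str) -> bool:
--     """Check if intent was misclassified"""
--     # Simple heuristic: check if correction mentions different action
--     correction_lower = correction.lower()
--     original_lower = original.lower()
--
--     intent_keywords = {
--         'search': ['search', 'find', 'look for'],
--         'send': ['send', 'compose', 'write'],
--         'list': ['list', 'show', 'display']
--     }
--
--     # Check if correction indicates different intent
--     for intent, keywords in intent_keywords.items():
--         if any(kw in correction_lower for kw in keywords) and not any(kw in original_lower for kw in keywords):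
--             return True
--
--     return False
-- ===== SOURCE B (Python) =====
-- def is_intent_mismatch(original: str, correction: str) -> bool:
--     """Check if intent was misclassified"""
--     # Single left-to-right scan of each text recognizes all keywords at every
--     # position simultaneously, accumulating a bitmask of exhibited intents;
--     # the decision is pure bit arithmetic: correction shows an intent bit the
--     # original lacks.
--     groups = [
--         (1, ['search', 'find', 'look for']),
--         (2, ['send', 'compose', 'write']),
--         (4, ['list', 'show', 'display']),
--     ]
--
--     def intent_mask(text):
--         t = text.lower()
--         m = 0
--         for i in range(len(t)):
--             for bit, kws in groups:
--                 if any(t.startswith(kw, i) for kw in kws):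
--                     m |= bit
--         return m
--
--     return intent_mask(correction) & ~intent_mask(original) != 0
-- ===== Notes on version B (the rewrite author's own statement) =====
-- stated objective: alternative
-- what changed: B replaces A's per-keyword substring tests with an early-return loop over the intent dict by a positional scanner: one left-to-right pass over each text that recognizes all nine keywords at every offset and accumulates an intent bitmask, deciding via mask(correction) & ~mask(original) != 0.
import Mathlib
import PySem

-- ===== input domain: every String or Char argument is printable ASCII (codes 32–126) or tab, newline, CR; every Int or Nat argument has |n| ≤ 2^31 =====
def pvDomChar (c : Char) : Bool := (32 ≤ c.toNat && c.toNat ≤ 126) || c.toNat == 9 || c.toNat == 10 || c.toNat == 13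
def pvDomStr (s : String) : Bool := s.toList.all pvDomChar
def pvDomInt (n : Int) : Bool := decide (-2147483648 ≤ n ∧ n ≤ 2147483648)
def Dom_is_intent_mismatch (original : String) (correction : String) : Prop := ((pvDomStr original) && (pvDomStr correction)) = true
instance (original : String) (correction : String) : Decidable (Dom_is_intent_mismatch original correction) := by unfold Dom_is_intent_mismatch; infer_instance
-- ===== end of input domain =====

-- B replaces A's per-keyword substring tests in an early-return loop by a positional scan of each text accumulating an intent bitmask, decided by bit arithmetic (alternative decomposition; no speed claim).


-- ===== PORT A =====
def is_intent_mismatch_kwlist : List (String × List String) :=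
  [("search", ["search", "find", "look for"]),
   ("send", ["send", "compose", "write"]),
   ("list", ["list", "show", "display"])]

-- A's for-loop over the dict items with an early `return True`
def is_intent_mismatch_loop (cl ol : String) : List (String × List String) → Bool
  | [] => false
  | (_, kws) :: rest =>
    if (kws.any (fun kw => PySem.Str.isIn kw cl)) && !(kws.any (fun kw => PySem.Str.isIn kw ol)) then
      true
    else
      is_intent_mismatch_loop cl ol rest

def is_intent_mismatch (original : String) (correction : String) : Bool :=
  let correction_lower := PySem.Str.lower correction
  let original_lower := PySem.Str.lower original
  is_intent_mismatch_loop correction_lower original_lower is_intent_mismatch_kwlist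

-- ===== PORT B =====
-- B's groups list: bit value paired with its keywords
def is_intent_mismatch_groups : List (Int × List String) :=
  [(1, ["search", "find", "look for"]),
   (2, ["send", "compose", "write"]),
   (4, ["list", "show", "display"])]

-- inner `for bit, kws in groups: if any(t.startswith(kw, i) …): m |= bit`
-- t.startswith(kw, i) with 0 ≤ i is exactly kw.toList.isPrefixOf (t.drop i)
def is_intent_mismatch_alt_step (t : List Char) (m : Int) (i : Nat) : Int :=
  is_intent_mismatch_groups.foldl
    (fun m' p => if p.2.any (fun kw => kw.toList.isPrefixOf (t.drop i)) then PySem.Int.bor m' p.1 else m') m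

-- B's intent_mask: `for i in range(len(t))` over the lowered text
def is_intent_mismatch_alt_mask (text : String) : Int :=
  let t := (PySem.Str.lower text).toList
  (List.range t.length).foldl (is_intent_mismatch_alt_step t) 0

def is_intent_mismatch_alt (original : String) (correction : String) : Bool :=
  decide (PySem.Int.band (is_intent_mismatch_alt_mask correction)
            (Int.not (is_intent_mismatch_alt_mask original)) ≠ 0)

-- ===== PRECONDITION & SPEC =====
def Spec_is_intent_mismatch (original : String) (correction : String) (out : Bool) : Prop := out = is_intent_mismatch_alt original correction
instance (original : String) (correction : String) (out : Bool) : Decidable (Spec_is_intent_mismatch original correction out) := by unfold Spec_is_intent_mismatch; infer_instance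

-- ===== CLAIM (what is proved, stated in full; the proofs are below) =====
def Claim_equal_is_intent_mismatch : Prop := ∀ (original : String) (correction : String), Dom_is_intent_mismatch original correction → Spec_is_intent_mismatch original correction (is_intent_mismatch original correction)

-- ===== LEMMAS AND PROOFS =====

-- the only 8 values B's mask can take, indexed by which intent bits are set
def pvMval (b1 b2 b3 : Bool) : Int :=
  (if b1 then 1 else 0) + (if b2 then 2 else 0) + (if b3 then 4 else 0)

-- "some keyword of group g starts at position i of t"
def pvHit (g : List String) (t : List Char) (i : Nat) : Bool :=
  g.any (fun kw => kw.toList.isPrefixOf (t.drop i))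

theorem pv_step_mval (t : List Char) (i : Nat) (c1 c2 c3 : Bool) :
    is_intent_mismatch_alt_step t (pvMval c1 c2 c3) i =
      pvMval (c1 || pvHit ["search", "find", "look for"] t i)
             (c2 || pvHit ["send", "compose", "write"] t i)
             (c3 || pvHit ["list", "show", "display"] t i) := by
  simp only [is_intent_mismatch_alt_step, is_intent_mismatch_groups, List.foldl, pvHit]
  generalize (["search", "find", "look for"].any (fun kw => kw.toList.isPrefixOf (t.drop i))) = a1
  generalize (["send", "compose", "write"].any (fun kw => kw.toList.isPrefixOf (t.drop i))) = a2
  generalize (["list", "show", "display"].any (fun kw => kw.toList.isPrefixOf (t.drop i))) = a3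
  cases c1 <;> cases c2 <;> cases c3 <;> cases a1 <;> cases a2 <;> cases a3 <;> decide

theorem pv_fold_mval (t : List Char) (l : List Nat) (c1 c2 c3 : Bool) :
    l.foldl (is_intent_mismatch_alt_step t) (pvMval c1 c2 c3) =
      pvMval (c1 || l.any (pvHit ["search", "find", "look for"] t))
             (c2 || l.any (pvHit ["send", "compose", "write"] t))
             (c3 || l.any (pvHit ["list", "show", "display"] t)) := by
  induction l generalizing c1 c2 c3 with
  | nil => simp
  | cons i l ih =>
    simp only [List.foldl_cons, pv_step_mval, ih, List.any_cons, Bool.or_assoc]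

theorem pv_mask_eq (text : String) :
    is_intent_mismatch_alt_mask text =
      pvMval ((List.range (PySem.Str.lower text).toList.length).any (pvHit ["search", "find", "look for"] (PySem.Str.lower text).toList))
             ((List.range (PySem.Str.lower text).toList.length).any (pvHit ["send", "compose", "write"] (PySem.Str.lower text).toList))
             ((List.range (PySem.Str.lower text).toList.length).any (pvHit ["list", "show", "display"] (PySem.Str.lower text).toList)) := by
  have h := pv_fold_mval (PySem.Str.lower text).toList
      (List.range (PySem.Str.lower text).toList.length) false false false
  simpa [is_intent_mismatch_alt_mask, pvMval] using h

-- a nonempty list is an infix iff it is a prefix at some position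
theorem pv_prefix_drop_iff (l1 l2 : List Char) (h : l1 ≠ []) :
    (∃ i, i < l2.length ∧ l1 <+: l2.drop i) ↔ l1 <:+: l2 := by
  constructor
  · rintro ⟨i, -, hp⟩
    exact hp.isInfix.trans (List.drop_suffix i l2).isInfix
  · rintro ⟨s, t2, rfl⟩
    refine ⟨s.length, ?_, ?_⟩
    · have : 0 < l1.length := List.length_pos_iff.mpr h
      simp only [List.length_append]
      omega
    · rw [List.append_assoc, List.drop_left]
      exact ⟨t2, rfl⟩

-- the positional scan over one group finds a hit iff some keyword is a substring
theorem pv_group_any (g : List String) (hg : ∀ kw ∈ g, kw ≠ "") (s : String) :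
    (List.range s.toList.length).any (pvHit g s.toList) =
      g.any (fun kw => PySem.Str.isIn kw s) := by
  apply Bool.eq_iff_iff.mpr
  simp only [pvHit, List.any_eq_true, List.mem_range,
    PySem.Str.isIn_iff_infix, List.isPrefixOf_iff_prefix]
  constructor
  · rintro ⟨i, hi, kw, hkw, hp⟩
    exact ⟨kw, hkw, hp.isInfix.trans (List.drop_suffix i s.toList).isInfix⟩
  · rintro ⟨kw, hkw, hinf⟩
    have hne : kw.toList ≠ [] := by
      intro hnil
      exact hg kw hkw (by simpa [String.toList_eq_nil_iff] using hnil)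
    obtain ⟨i, hi, hp⟩ := (pv_prefix_drop_iff kw.toList s.toList hne).mpr hinf
    exact ⟨i, hi, kw, hkw, hp⟩

theorem pv_final (a1 a2 a3 b1 b2 b3 : Bool) :
    (if a1 && !b1 then true
     else if a2 && !b2 then true
     else if a3 && !b3 then true
     else false) =
      decide (PySem.Int.band (pvMval a1 a2 a3) (Int.not (pvMval b1 b2 b3)) ≠ 0) := by
  cases a1 <;> cases a2 <;> cases a3 <;> cases b1 <;> cases b2 <;> cases b3 <;> decide

-- ===== VERDICT (by name: the statement is the Claim_ definition above) =====
theorem is_intent_mismatch_spec : Claim_equal_is_intent_mismatch := by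
  intro original correction _
  unfold Spec_is_intent_mismatch is_intent_mismatch is_intent_mismatch_alt
  rw [pv_mask_eq correction, pv_mask_eq original,
    pv_group_any ["search", "find", "look for"] (by decide),
    pv_group_any ["send", "compose", "write"] (by decide),
    pv_group_any ["list", "show", "display"] (by decide),
    pv_group_any ["search", "find", "look for"] (by decide),
    pv_group_any ["send", "compose", "write"] (by decide),
    pv_group_any ["list", "show", "display"] (by decide)]
  simp only [is_intent_mismatch_kwlist, is_intent_mismatch_loop, List.any_cons,
    List.any_nil, Bool.or_false]
  exact pv_final _ _ _ _ _ _
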